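-- pv_equiv track=rewrite | github.com/etherlabsio/ai-engine | services/artifacts_updater/graph_updater.py | update_communitiy_artifacts
-- ===== SOURCE A (Python) =====
-- def update_communitiy_artifacts(agreed_communities, com_map, gc, lc):
--     updated_comm_list = []
--     for new_ent, comm in agreed_communities.items():
--         if comm!=-1:
--             com_map[new_ent] = comm
--             if comm in gc.keys():
--                 gc[comm] += 1
--             else:
--                 gc[comm] = 1
--             if comm in lc.keys():
--                 if len(lc[comm])!=5:
--                     if comm not in updated_comm_list:
--                         lc[comm].append(1)
--                     else:
--                         lc[comm].append(lc[comm].pop()+1)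
--                 else:
--                     if comm not in updated_comm_list:
--                         del lc[comm][0]
--                         lc[comm].append(1)
--                     else:
--                         lc[comm].append(lc[comm].pop()+1)
--             else:
--                 lc[comm] = [1]
--             updated_comm_list.append(comm)
--     return com_map, gc, lc
-- ===== SOURCE B (Python) =====
-- def update_communitiy_artifacts(agreed_communities, com_map, gc_, lc):  # gc_ = the gc dict (renamed not to shadow the gc module name)
--     # Pass 1: record entity -> community and count occurrences per community.
--     counts = {}
--     for new_ent, comm in agreed_communities.items():
--         if comm != -1:
--             com_map[new_ent] = comm
--             counts[comm] = counts.get(comm, 0) + 1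
--     # Pass 2: apply each community's total count once.
--     for comm, k in counts.items():
--         gc_[comm] = gc_.get(comm, 0) + k
--         if comm in lc:
--             if len(lc[comm]) == 5:
--                 del lc[comm][0]
--             lc[comm].append(k)
--         else:
--             lc[comm] = [k]
--     return com_map, gc_, lc
-- ===== Notes on version B (the rewrite author's own statement) =====
-- stated objective: alternative
-- what changed: B replaces A's single incremental fold (per-occurrence gc increments, a growing updated_comm_list membership test, and pop/append window surgery on repeated communities) by two passes: first build com_map and a per-community occurrence counter, then apply each community's total count once to gc and to its 5-slot sliding window in lc.
import Mathlib
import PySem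

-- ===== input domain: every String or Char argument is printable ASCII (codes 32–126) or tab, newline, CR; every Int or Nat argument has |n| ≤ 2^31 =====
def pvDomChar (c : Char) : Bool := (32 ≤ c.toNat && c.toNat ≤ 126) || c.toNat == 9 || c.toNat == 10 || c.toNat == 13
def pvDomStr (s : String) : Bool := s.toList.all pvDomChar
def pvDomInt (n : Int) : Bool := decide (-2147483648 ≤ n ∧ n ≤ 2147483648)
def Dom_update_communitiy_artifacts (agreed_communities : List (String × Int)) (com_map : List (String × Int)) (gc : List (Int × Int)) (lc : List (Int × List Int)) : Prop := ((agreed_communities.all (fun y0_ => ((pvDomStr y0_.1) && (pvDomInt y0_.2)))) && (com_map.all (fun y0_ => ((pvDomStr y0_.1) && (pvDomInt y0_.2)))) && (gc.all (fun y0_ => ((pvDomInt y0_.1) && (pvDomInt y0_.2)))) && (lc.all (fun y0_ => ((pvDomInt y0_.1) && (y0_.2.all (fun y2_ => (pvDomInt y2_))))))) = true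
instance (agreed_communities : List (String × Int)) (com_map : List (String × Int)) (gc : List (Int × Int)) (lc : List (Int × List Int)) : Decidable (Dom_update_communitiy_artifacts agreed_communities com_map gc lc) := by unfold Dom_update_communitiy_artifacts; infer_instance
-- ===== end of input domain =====

-- B replaces A's incremental per-occurrence sliding-window/seen-list fold by a count-then-apply
-- two-pass scheme (a Counter built first, then one update per community); objective: alternative.


-- ===== PORT A =====
-- A's loop body over the state (updated_comm_list, com_map, gc, lc).
-- `lc[comm].pop()` is ported as getLast?/dropLast; Python would raise IndexError on an empty
-- window, but that branch only runs with comm already in updated_comm_list, where the window is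
-- nonempty, so the `.getD 0` default is never read and A is total.
def pvStepA_update (s : (List Int) × (PySem.Dict String Int) × (PySem.Dict Int Int) × (PySem.Dict Int (List Int))) (p : String × Int) : (List Int) × (PySem.Dict String Int) × (PySem.Dict Int Int) × (PySem.Dict Int (List Int)) :=
  if p.2 ≠ -1 then
    (s.1 ++ [p.2],
     s.2.1.insert p.1 p.2,
     (if s.2.2.1.contains p.2 then s.2.2.1.insert p.2 (s.2.2.1.getD p.2 0 + 1)
      else s.2.2.1.insert p.2 1),
     (if s.2.2.2.contains p.2 then
        (if (s.2.2.2.getD p.2 []).length ≠ 5 then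
           (if ¬ s.1.contains p.2 then s.2.2.2.insert p.2 ((s.2.2.2.getD p.2 []) ++ [1])
            else s.2.2.2.insert p.2 ((s.2.2.2.getD p.2 []).dropLast ++ [(s.2.2.2.getD p.2 []).getLast?.getD 0 + 1]))
         else
           (if ¬ s.1.contains p.2 then s.2.2.2.insert p.2 ((s.2.2.2.getD p.2 []).drop 1 ++ [1])
            else s.2.2.2.insert p.2 ((s.2.2.2.getD p.2 []).dropLast ++ [(s.2.2.2.getD p.2 []).getLast?.getD 0 + 1])))
      else s.2.2.2.insert p.2 [1]))
  else s

def update_communitiy_artifacts (agreed_communities : List (String × Int)) (com_map : List (String × Int)) (gc : List (Int × Int)) (lc : List (Int × List Int)) : (List (String × Int)) × (List (Int × Int)) × (List (Int × List Int)) :=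
  let st := (PySem.Dict.ofList agreed_communities).items.foldl pvStepA_update
    ([], PySem.Dict.ofList com_map, PySem.Dict.ofList gc, PySem.Dict.ofList lc)
  (st.2.1.items, st.2.2.1.items, st.2.2.2.items)

-- ===== PORT B =====
-- pass 1 body: record entity -> community, and bump the per-community occurrence counter
def pvStepB1_update (s : (PySem.Dict String Int) × (PySem.Dict Int Int)) (p : String × Int) : (PySem.Dict String Int) × (PySem.Dict Int Int) :=
  if p.2 ≠ -1 then (s.1.insert p.1 p.2, s.2.insert p.2 (s.2.getD p.2 0 + 1)) else s

-- pass 2: apply one community's total count k to gc and to its sliding window in lc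
def pvGstepB_update (g : PySem.Dict Int Int) (q : Int × Int) : PySem.Dict Int Int :=
  g.insert q.1 (g.getD q.1 0 + q.2)

def pvLstepB_update (l : PySem.Dict Int (List Int)) (q : Int × Int) : PySem.Dict Int (List Int) :=
  if l.contains q.1 then
    l.insert q.1 ((if (l.getD q.1 []).length = 5 then (l.getD q.1 []).drop 1 else l.getD q.1 []) ++ [q.2])
  else l.insert q.1 [q.2]

def update_communitiy_artifacts_alt (agreed_communities : List (String × Int)) (com_map : List (String × Int)) (gc : List (Int × Int)) (lc : List (Int × List Int)) : (List (String × Int)) × (List (Int × Int)) × (List (Int × List Int)) :=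
  let p1 := (PySem.Dict.ofList agreed_communities).items.foldl pvStepB1_update
    (PySem.Dict.ofList com_map, PySem.Dict.empty)
  let p2 := p1.2.items.foldl (fun s q => (pvGstepB_update s.1 q, pvLstepB_update s.2 q))
    (PySem.Dict.ofList gc, PySem.Dict.ofList lc)
  (p1.1.items, p2.1.items, p2.2.items)

-- ===== PRECONDITION & SPEC =====
def Spec_update_communitiy_artifacts (agreed_communities : List (String × Int)) (com_map : List (String × Int)) (gc : List (Int × Int)) (lc : List (Int × List Int)) (out : (List (String × Int)) × (List (Int × Int)) × (List (Int × List Int))) : Prop := out = update_communitiy_artifacts_alt agreed_communities com_map gc lc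
instance (agreed_communities : List (String × Int)) (com_map : List (String × Int)) (gc : List (Int × Int)) (lc : List (Int × List Int)) (out : (List (String × Int)) × (List (Int × Int)) × (List (Int × List Int))) : Decidable (Spec_update_communitiy_artifacts agreed_communities com_map gc lc out) := by unfold Spec_update_communitiy_artifacts; infer_instance

-- ===== CLAIM (what is proved, stated in full; the proofs are below) =====
def Claim_equal_update_communitiy_artifacts : Prop := ∀ (agreed_communities : List (String × Int)) (com_map : List (String × Int)) (gc : List (Int × Int)) (lc : List (Int × List Int)), Dom_update_communitiy_artifacts agreed_communities com_map gc lc → Spec_update_communitiy_artifacts agreed_communities com_map gc lc (update_communitiy_artifacts agreed_communities com_map gc lc)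

-- ===== LEMMAS AND PROOFS =====

-- the community stream both programs process: values ≠ -1, in iteration order
def pvMs (l : List (String × Int)) : List Int :=
  (l.filter (fun p => decide (p.2 ≠ -1))).map Prod.snd

-- abstract "apply count k at key c" step: F maps (old value?, k) to the new value
def pvApp {ν : Type} (F : Option ν → Int → ν) (d : PySem.Dict Int ν) (q : Int × Int) : PySem.Dict Int ν :=
  d.insert q.1 (F (d.get? q.1) q.2)

def pvLB {ν : Type} (F : Option ν → Int → ν) (items : List (Int × Int)) (d : PySem.Dict Int ν) : PySem.Dict Int ν :=
  items.foldl (pvApp F) d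

-- abstract form of A's incremental step with its seen-list: first occurrence applies F with 1,
-- later occurrences bump the stored value with G
def pvStepAbs {ν : Type} (F : Option ν → Int → ν) (G : ν → ν) (dflt : ν) (s : (List Int) × PySem.Dict Int ν) (c : Int) : (List Int) × PySem.Dict Int ν :=
  (s.1 ++ [c], if s.1.contains c then s.2.insert c (G (s.2.getD c dflt)) else pvApp F s.2 (c, 1))

-- the concrete F/G for gc (running totals) and lc (sliding windows)
def pvFgc : Option Int → Int → Int := fun o k => o.getD 0 + k
def pvGgc : Int → Int := fun v => v + 1
def pvFlc : Option (List Int) → Int → List Int :=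
  fun o k => (match o with
              | some w => if w.length = 5 then w.drop 1 else w
              | none => []) ++ [k]
def pvGlc : List Int → List Int := fun w => w.dropLast ++ [w.getLast?.getD 0 + 1]

lemma pv_get?_of_contains {ν : Type} (d : PySem.Dict Int ν) (c : Int) (dflt : ν)
    (h : d.contains c = true) : d.get? c = some (d.getD c dflt) := by
  rw [PySem.Dict.contains_eq_isSome_get?] at h
  cases hg : d.get? c with
  | none => rw [hg] at h; simp at h
  | some v => rw [PySem.Dict.getD_of_get?_eq_some d dflt hg]

lemma pv_get?_of_not_contains {ν : Type} (d : PySem.Dict Int ν) (c : Int)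
    (h : d.contains c = false) : d.get? c = none := by
  rw [PySem.Dict.get?_eq_none_iff_contains]; exact h

lemma pv_insert_comm {ν : Type} (d : PySem.Dict Int ν) (c a : Int) (v x : ν)
    (hc : d.contains c = true) (hne : a ≠ c) :
    (d.insert c v).insert a x = (d.insert a x).insert c v := by
  apply PySem.Dict.ext
  have hca : (d.insert c v).contains a = d.contains a := by
    rw [PySem.Dict.contains_insert]; simp [hne]
  have hac : (d.insert a x).contains c = true := by
    rw [PySem.Dict.contains_insert]; simp [hc]
  by_cases ha : d.contains a = true
  · rw [PySem.Dict.items_insert_of_contains _ x (by rw [hca]; exact ha),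
        PySem.Dict.items_insert_of_contains _ v hc,
        PySem.Dict.items_insert_of_contains _ v hac,
        PySem.Dict.items_insert_of_contains _ x ha,
        List.map_map, List.map_map]
    apply List.map_congr_left
    intro p _
    by_cases h1 : p.1 = c <;> by_cases h2 : p.1 = a <;>
      simp_all [Function.comp, beq_iff_eq]
  · have ha' : d.contains a = false := by
      cases hb : d.contains a with
      | false => rfl
      | true => exact absurd hb ha
    rw [PySem.Dict.items_insert_of_not_contains _ x (by rw [hca]; exact ha'),
        PySem.Dict.items_insert_of_contains _ v hc,
        PySem.Dict.items_insert_of_contains _ v hac,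
        PySem.Dict.items_insert_of_not_contains _ x ha',
        List.map_append]
    simp [beq_iff_eq, hne]

lemma pv_get?_pvLB {ν : Type} (F : Option ν → Int → ν) (c : Int) :
    ∀ (items : List (Int × Int)) (d : PySem.Dict Int ν), (∀ q ∈ items, q.1 ≠ c) →
      (pvLB F items d).get? c = d.get? c := by
  intro items
  induction items with
  | nil => intro d _; rfl
  | cons q rest ih =>
    intro d h
    show (pvLB F rest (pvApp F d q)).get? c = d.get? c
    rw [ih _ (fun p hp => h p (List.mem_cons_of_mem _ hp))]
    exact PySem.Dict.get?_insert_of_ne d _ (Ne.symm (h q (List.mem_cons_self ..)))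

lemma pv_pvLB_insert_comm {ν : Type} (F : Option ν → Int → ν) (c : Int) (v : ν) :
    ∀ (items : List (Int × Int)) (d : PySem.Dict Int ν), (∀ q ∈ items, q.1 ≠ c) →
      d.contains c = true →
      pvLB F items (d.insert c v) = (pvLB F items d).insert c v := by
  intro items
  induction items with
  | nil => intro d _ _; rfl
  | cons q rest ih =>
    intro d h hc
    have hqc : q.1 ≠ c := h q (List.mem_cons_self ..)
    show pvLB F rest (pvApp F (d.insert c v) q) = (pvLB F rest (pvApp F d q)).insert c v
    have h1 : pvApp F (d.insert c v) q = (pvApp F d q).insert c v := by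
      unfold pvApp
      rw [PySem.Dict.get?_insert_of_ne d v hqc,
          pv_insert_comm d c q.1 v _ hc hqc]
    rw [h1]
    apply ih _ (fun p hp => h p (List.mem_cons_of_mem _ hp))
    unfold pvApp
    rw [PySem.Dict.contains_insert]
    simp [hc]

lemma pv_pvLB_bump {ν : Type} (F : Option ν → Int → ν) (G : ν → ν) (dflt : ν)
    (hFG : ∀ o k, G (F o k) = F o (k + 1)) :
    ∀ (items : List (Int × Int)) (d : PySem.Dict Int ν) (c k : Int),
      (items.map Prod.fst).Nodup → (c, k) ∈ items →
      pvLB F (items.map (fun p => if p.1 == c then (c, k + 1) else p)) d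
        = (pvLB F items d).insert c (G ((pvLB F items d).getD c dflt)) := by
  intro items
  induction items with
  | nil => intro d c k _ hk; cases hk
  | cons p rest ih =>
    intro d c k hnd hk
    rw [List.map_cons] at hnd
    have hnd1 : p.1 ∉ rest.map Prod.fst := (List.nodup_cons.mp hnd).1
    have hnd2 : (rest.map Prod.fst).Nodup := (List.nodup_cons.mp hnd).2
    by_cases hp : p.1 = c
    · have hpk : p = (c, k) := by
        rcases List.mem_cons.mp hk with h | h
        · exact h.symm
        · exact absurd (List.mem_map.mpr ⟨(c, k), h, rfl⟩) (by rw [hp] at hnd1; exact hnd1)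
      subst hpk
      have hrest : ∀ q ∈ rest, q.1 ≠ c := by
        intro q hq hqc
        exact hnd1 (by rw [hp]; exact hqc ▸ List.mem_map.mpr ⟨q, hq, rfl⟩)
      have hmap : rest.map (fun p => if p.1 == c then (c, k + 1) else p) = rest := by
        calc rest.map (fun p => if p.1 == c then (c, k + 1) else p)
            = rest.map id := List.map_congr_left (by intro q hq; simp [beq_iff_eq, hrest q hq])
          _ = rest := List.map_id rest
      rw [List.map_cons, hmap]
      simp only [beq_self_eq_true, if_pos]
      show pvLB F rest (pvApp F d (c, k + 1)) = _
      set g1 := pvApp F d (c, k) with hg1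
      have hv : pvApp F d (c, k + 1) = g1.insert c (G (g1.getD c dflt)) := by
        rw [hg1]
        unfold pvApp
        rw [PySem.Dict.insert_insert_self, PySem.Dict.getD_insert_self, hFG]
      rw [hv]
      have hc1 : g1.contains c = true := by
        rw [hg1]; unfold pvApp; rw [PySem.Dict.contains_insert]; simp
      rw [pv_pvLB_insert_comm F c _ rest g1 hrest hc1]
      show _ = (pvLB F rest g1).insert c (G ((pvLB F rest g1).getD c dflt))
      simp only [PySem.Dict.getD_eq_get?_getD, pv_get?_pvLB F c rest g1 hrest]
    · have hk' : (c, k) ∈ rest := by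
        rcases List.mem_cons.mp hk with h | h
        · exact absurd (congrArg Prod.fst h).symm hp
        · exact h
      rw [List.map_cons, if_neg (by simp [hp])]
      show pvLB F (rest.map _) (pvApp F d p) = _
      exact ih (pvApp F d p) c k hnd2 hk'

lemma pv_main {ν : Type} (F : Option ν → Int → ν) (G : ν → ν) (dflt : ν)
    (hFG : ∀ o k, G (F o k) = F o (k + 1)) (ms : List Int) (d : PySem.Dict Int ν) :
    ms.foldl (pvStepAbs F G dflt) ([], d) = (ms, pvLB F (PySem.Dict.counter ms).items d) := by
  induction ms using List.reverseRecOn with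
  | nil => rfl
  | append_singleton ms c ih =>
    rw [List.foldl_append, ih]
    simp only [List.foldl_cons, List.foldl_nil]
    unfold pvStepAbs
    rw [PySem.Dict.counter_append_singleton]
    rw [show (PySem.Dict.counter ms).modify c 0 (fun x => x + 1)
          = (PySem.Dict.counter ms).insert c ((PySem.Dict.counter ms).getD c 0 + 1) from rfl]
    by_cases hc : ms.contains c = true
    · have hcc : (PySem.Dict.counter ms).contains c = true := by
        rw [PySem.Dict.contains_counter]; exact hc
      have hg : (PySem.Dict.counter ms).get? c = some ((PySem.Dict.counter ms).getD c 0) :=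
        pv_get?_of_contains _ c 0 hcc
      have hmem : (c, (PySem.Dict.counter ms).getD c 0) ∈ (PySem.Dict.counter ms).items :=
        PySem.Dict.mem_items_of_get?_eq_some _ hg
      have hnodup : ((PySem.Dict.counter ms).items.map Prod.fst).Nodup := by
        have := PySem.Dict.nodup_keys_counter (κ := Int) ms
        simpa [PySem.Dict.keys] using this
      rw [PySem.Dict.items_insert_of_contains _ _ hcc,
          pv_pvLB_bump F G dflt hFG _ d c _ hnodup hmem, if_pos hc]
    · have hc' : ms.contains c = false := by
        cases hb : ms.contains c with
        | false => rfl
        | true => exact absurd hb hc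
      have hcc : (PySem.Dict.counter ms).contains c = false := by
        rw [PySem.Dict.contains_counter]; exact hc'
      rw [PySem.Dict.items_insert_of_not_contains _ _ hcc,
          PySem.Dict.getD_of_not_contains _ _ hcc,
          if_neg (by rw [hc']; exact Bool.false_ne_true)]
      simp [pvLB, pvApp, List.foldl_append]

-- fold over pairs with an `if comm != -1` guard reduces to a fold over pvMs
lemma pv_fold_ms {σ : Type} (f : σ → Int → σ) :
    ∀ (l : List (String × Int)) (s : σ),
      l.foldl (fun t p => if p.2 ≠ -1 then f t p.2 else t) s = (pvMs l).foldl f s := by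
  intro l
  induction l with
  | nil => intro s; rfl
  | cons p rest ih =>
    intro s
    by_cases h : p.2 = -1
    · rw [List.foldl_cons, if_neg (by simp [h]),
          show pvMs (p :: rest) = pvMs rest by simp [pvMs, h], ih]
    · rw [List.foldl_cons, if_pos h,
          show pvMs (p :: rest) = p.2 :: pvMs rest by simp [pvMs, h],
          List.foldl_cons, ih]

-- A's gc / lc loop bodies, named (identical to the expressions in pvStepA_update)
def pvGstepA (g : PySem.Dict Int Int) (c : Int) : PySem.Dict Int Int :=
  if g.contains c then g.insert c (g.getD c 0 + 1) else g.insert c 1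

def pvLstepA (t : (List Int) × PySem.Dict Int (List Int)) (c : Int) : (List Int) × PySem.Dict Int (List Int) :=
  (t.1 ++ [c],
   (if t.2.contains c then
      (if (t.2.getD c []).length ≠ 5 then
         (if ¬ t.1.contains c then t.2.insert c ((t.2.getD c []) ++ [1])
          else t.2.insert c ((t.2.getD c []).dropLast ++ [(t.2.getD c []).getLast?.getD 0 + 1]))
       else
         (if ¬ t.1.contains c then t.2.insert c ((t.2.getD c []).drop 1 ++ [1])
          else t.2.insert c ((t.2.getD c []).dropLast ++ [(t.2.getD c []).getLast?.getD 0 + 1])))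
    else t.2.insert c [1]))

-- A's one fold decomposes per component
lemma pv_A_fold :
    ∀ (l : List (String × Int)) (u : List Int) (cmd : PySem.Dict String Int)
      (gcd : PySem.Dict Int Int) (lcd : PySem.Dict Int (List Int)),
      l.foldl pvStepA_update (u, cmd, gcd, lcd)
        = (l.foldl (fun t p => if p.2 ≠ -1 then t ++ [p.2] else t) u,
           l.foldl (fun m p => if p.2 ≠ -1 then m.insert p.1 p.2 else m) cmd,
           l.foldl (fun g p => if p.2 ≠ -1 then pvGstepA g p.2 else g) gcd,
           (l.foldl (fun t p => if p.2 ≠ -1 then pvLstepA t p.2 else t) (u, lcd)).2) := by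
  intro l
  induction l with
  | nil => intro u cmd gcd lcd; rfl
  | cons p rest ih =>
    intro u cmd gcd lcd
    by_cases h : p.2 = -1 <;>
      simp only [List.foldl_cons, pvStepA_update, pvGstepA, pvLstepA, h, ne_eq,
        not_true_eq_false, if_false, if_true, not_false_eq_true] <;>
      exact ih _ _ _ _

-- B's first fold decomposes per component
lemma pv_B1_fold :
    ∀ (l : List (String × Int)) (cmd : PySem.Dict String Int) (cnt : PySem.Dict Int Int),
      l.foldl pvStepB1_update (cmd, cnt)
        = (l.foldl (fun m p => if p.2 ≠ -1 then m.insert p.1 p.2 else m) cmd,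
           l.foldl (fun d p => if p.2 ≠ -1 then d.insert p.2 (d.getD p.2 0 + 1) else d) cnt) := by
  intro l
  induction l with
  | nil => intro cmd cnt; rfl
  | cons p rest ih =>
    intro cmd cnt
    by_cases h : p.2 = -1 <;>
      simp only [List.foldl_cons, pvStepB1_update, h, ne_eq, not_true_eq_false,
        if_false, if_true, not_false_eq_true] <;>
      exact ih _ _

-- the concrete step functions coincide with their abstract forms
lemma pv_FGgc : ∀ (o : Option Int) (k : Int), pvGgc (pvFgc o k) = pvFgc o (k + 1) := by
  intro o k; unfold pvFgc pvGgc; ring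

lemma pv_FGlc : ∀ (o : Option (List Int)) (k : Int), pvGlc (pvFlc o k) = pvFlc o (k + 1) := by
  intro o k
  unfold pvFlc pvGlc
  cases o <;> simp

lemma pv_gcA_eq : pvGstepA = fun (g : PySem.Dict Int Int) (c : Int) => g.insert c (g.getD c 0 + 1) := by
  funext g c
  unfold pvGstepA
  by_cases h : g.contains c = true
  · rw [if_pos h]
  · have h' : g.contains c = false := by
      cases hb : g.contains c with
      | false => rfl
      | true => exact absurd hb h
    rw [if_neg h, PySem.Dict.getD_of_not_contains g 0 h']
    norm_num

lemma pv_gcB_eq : pvGstepB_update = pvApp pvFgc := by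
  funext g q
  unfold pvGstepB_update pvApp pvFgc
  rw [PySem.Dict.getD_eq_get?_getD]

lemma pv_lcB_eq : pvLstepB_update = pvApp pvFlc := by
  funext l q
  unfold pvLstepB_update pvApp pvFlc
  by_cases h : l.contains q.1 = true
  · rw [if_pos h, pv_get?_of_contains l q.1 [] h]
  · have h' : l.contains q.1 = false := by
      cases hb : l.contains q.1 with
      | false => rfl
      | true => exact absurd hb h
    rw [if_neg h, pv_get?_of_not_contains l q.1 h']
    simp

lemma pv_lcA_eq : pvLstepA = pvStepAbs pvFlc pvGlc [] := by
  funext t c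
  unfold pvLstepA pvStepAbs pvApp pvFlc pvGlc
  by_cases hs : t.1.contains c = true
  · have hm : c ∈ t.1 := by simpa using hs
    rw [if_pos hs]
    by_cases hl : t.2.contains c = true
    · rw [if_pos hl]
      simp [hm]
    · have hl' : t.2.contains c = false := by
        cases hb : t.2.contains c with
        | false => rfl
        | true => exact absurd hb hl
      rw [if_neg hl, PySem.Dict.getD_of_not_contains _ _ hl']
      simp
  · have hm : c ∉ t.1 := by simpa using hs
    rw [if_neg hs]
    by_cases hl : t.2.contains c = true
    · rw [if_pos hl, pv_get?_of_contains t.2 c [] hl]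
      by_cases h5 : (t.2.getD c []).length = 5 <;> simp [hm, h5]
    · have hl' : t.2.contains c = false := by
        cases hb : t.2.contains c with
        | false => rfl
        | true => exact absurd hb hl
      rw [if_neg hl, pv_get?_of_not_contains t.2 c hl']
      simp

-- for gc the seen-list is irrelevant: both branches of pvStepAbs write the same value
lemma pv_gc_noseen : ∀ (ms : List Int) (u : List Int) (g : PySem.Dict Int Int),
    (ms.foldl (pvStepAbs pvFgc pvGgc 0) (u, g)).2
      = ms.foldl (fun (g : PySem.Dict Int Int) (c : Int) => g.insert c (g.getD c 0 + 1)) g := by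
  intro ms
  induction ms with
  | nil => intro u g; rfl
  | cons c rest ih =>
    intro u g
    rw [List.foldl_cons, List.foldl_cons]
    have hstep : pvStepAbs pvFgc pvGgc 0 (u, g) c = (u ++ [c], g.insert c (g.getD c 0 + 1)) := by
      unfold pvStepAbs pvApp pvFgc pvGgc
      by_cases h : u.contains c = true
      · rw [if_pos h]
      · rw [if_neg h, PySem.Dict.getD_eq_get?_getD]
    rw [hstep]
    exact ih _ _

-- characterisation of A: count-then-apply on the processed stream
lemma pv_A_char (ac : List (String × Int)) (cm : List (String × Int)) (gc : List (Int × Int)) (lc : List (Int × List Int)) :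
    update_communitiy_artifacts ac cm gc lc
      = (((PySem.Dict.ofList ac).items.foldl
            (fun m p => if p.2 ≠ -1 then m.insert p.1 p.2 else m) (PySem.Dict.ofList cm)).items,
         (pvLB pvFgc (PySem.Dict.counter (pvMs (PySem.Dict.ofList ac).items)).items (PySem.Dict.ofList gc)).items,
         (pvLB pvFlc (PySem.Dict.counter (pvMs (PySem.Dict.ofList ac).items)).items (PySem.Dict.ofList lc)).items) := by
  unfold update_communitiy_artifacts
  rw [pv_A_fold]
  have hgc : (PySem.Dict.ofList ac).items.foldl
      (fun g p => if p.2 ≠ -1 then pvGstepA g p.2 else g) (PySem.Dict.ofList gc)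
      = pvLB pvFgc (PySem.Dict.counter (pvMs (PySem.Dict.ofList ac).items)).items (PySem.Dict.ofList gc) := by
    rw [pv_fold_ms pvGstepA _ _, pv_gcA_eq, ← pv_gc_noseen _ [] _,
        pv_main pvFgc pvGgc 0 pv_FGgc]
  have hlc : ((PySem.Dict.ofList ac).items.foldl
      (fun t p => if p.2 ≠ -1 then pvLstepA t p.2 else t) ([], PySem.Dict.ofList lc)).2
      = pvLB pvFlc (PySem.Dict.counter (pvMs (PySem.Dict.ofList ac).items)).items (PySem.Dict.ofList lc) := by
    rw [pv_fold_ms pvLstepA _ _, pv_lcA_eq, pv_main pvFlc pvGlc [] pv_FGlc]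
  rw [hgc, hlc]

-- characterisation of B: the same count-then-apply
lemma pv_B_char (ac : List (String × Int)) (cm : List (String × Int)) (gc : List (Int × Int)) (lc : List (Int × List Int)) :
    update_communitiy_artifacts_alt ac cm gc lc
      = (((PySem.Dict.ofList ac).items.foldl
            (fun m p => if p.2 ≠ -1 then m.insert p.1 p.2 else m) (PySem.Dict.ofList cm)).items,
         (pvLB pvFgc (PySem.Dict.counter (pvMs (PySem.Dict.ofList ac).items)).items (PySem.Dict.ofList gc)).items,
         (pvLB pvFlc (PySem.Dict.counter (pvMs (PySem.Dict.ofList ac).items)).items (PySem.Dict.ofList lc)).items) := by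
  unfold update_communitiy_artifacts_alt
  rw [pv_B1_fold]
  dsimp only
  have hcnt : (PySem.Dict.ofList ac).items.foldl
      (fun d p => if p.2 ≠ -1 then d.insert p.2 (d.getD p.2 0 + 1) else d) PySem.Dict.empty
      = PySem.Dict.counter (pvMs (PySem.Dict.ofList ac).items) := by
    rw [pv_fold_ms (fun (d : PySem.Dict Int Int) (c : Int) => d.insert c (d.getD c 0 + 1)) _ _]
    exact PySem.Dict.foldl_insert_getD_add_one_eq_counter _
  rw [hcnt]
  have hpair : ∀ (items : List (Int × Int)) (g : PySem.Dict Int Int) (w : PySem.Dict Int (List Int)),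
      items.foldl (fun s q => (pvGstepB_update s.1 q, pvLstepB_update s.2 q)) (g, w)
        = (pvLB pvFgc items g, pvLB pvFlc items w) := by
    intro items
    induction items with
    | nil => intro g w; rfl
    | cons q rest ih =>
      intro g w
      rw [List.foldl_cons]
      show rest.foldl _ (pvGstepB_update g q, pvLstepB_update w q) = _
      rw [ih]
      show _ = (pvLB pvFgc rest (pvApp pvFgc g q), pvLB pvFlc rest (pvApp pvFlc w q))
      rw [pv_gcB_eq, pv_lcB_eq]
  rw [hpair]

-- ===== VERDICT (by name: the statement is the Claim_ definition above) =====
theorem update_communitiy_artifacts_spec : Claim_equal_update_communitiy_artifacts := by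
  intro ac cm gc lc _
  unfold Spec_update_communitiy_artifacts
  rw [pv_A_char, pv_B_char]
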